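-- pv_equiv track=rewrite | github.com/nebulusneighbor/pitch-permutations | code_12pos/granular_3s_7s_unique_k1rotations_12.py | count_overlaps
-- ===== SOURCE A (Python) =====
-- def rotate(sequence):
--     """Generate all rotations of a given sequence."""
--     return [sequence[i:] + sequence[:i] for i in range(len(sequence))]
--
-- def count_overlaps(perm1, perm2):
--     """Count how many times perm1 overlaps within any rotation of perm2."""
--     k1 = perm1.count('1')
--     n = len(perm2)
--     overlap_count = 0
--     for rot in rotate(perm2):
--         for i in range(n):
--             if all(perm1[j] == rot[(i + j) % n] for j in range(k1)):
--                 overlap_count += 1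
--     return overlap_count
-- ===== SOURCE B (Python) =====
-- def count_overlaps(perm1, perm2):
--     """Count how many times perm1 overlaps within any rotation of perm2."""
--     n = len(perm2)
--     if n == 0:
--         return 0
--     k1 = perm1.count('1')
--     pattern = perm1[:k1]
--     text = perm2 * (2 + k1 // n)
--     c = 0
--     for i in range(n):
--         if text[i:i+k1] == pattern:
--             c += 1
--     return n * c
-- ===== Notes on version B (the rewrite author's own statement) =====
-- stated objective: faster
-- what changed: Every rotation of perm2 yields the same number of cyclic prefix matches, so B counts the cyclic matches of perm1[:k1] once over perm2 (against a repeated copy of perm2) and multiplies by n, instead of A's scan of all n rotations.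
import Mathlib
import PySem

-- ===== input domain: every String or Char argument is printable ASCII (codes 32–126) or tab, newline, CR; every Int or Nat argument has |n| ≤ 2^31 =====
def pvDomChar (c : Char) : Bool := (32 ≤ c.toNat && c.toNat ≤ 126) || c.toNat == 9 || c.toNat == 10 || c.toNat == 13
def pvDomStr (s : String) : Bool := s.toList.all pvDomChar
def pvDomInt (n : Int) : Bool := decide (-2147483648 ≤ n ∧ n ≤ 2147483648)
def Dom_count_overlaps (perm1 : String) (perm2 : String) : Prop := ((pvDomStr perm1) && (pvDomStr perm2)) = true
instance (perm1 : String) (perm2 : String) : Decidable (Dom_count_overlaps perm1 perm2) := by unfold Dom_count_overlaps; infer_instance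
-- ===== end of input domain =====

-- B counts the cyclic matches of perm1[:k1] in perm2 once and multiplies by n (every
-- rotation contributes the same count), instead of A's scan of every rotation: faster.

-- ===== PORT A =====
-- rotate(sequence): all rotations of perm2 as a list comprehension
def pvRotate (s : List Char) : List (List Char) :=
  (PySem.List.pyRange 0 s.length 1).map
    (fun i => PySem.List.slice s (some i) none ++ PySem.List.slice s none (some i))

def count_overlaps (perm1 : String) (perm2 : String) : Int :=
  let p1 := perm1.toList
  let p2 := perm2.toList
  let k1 := PySem.Chars.count p1 ['1']
  let n := p2.length
  (pvRotate p2).foldl (fun acc rot =>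
    (PySem.List.pyRange 0 (n : Int) 1).foldl (fun acc i =>
      if (PySem.List.pyRange 0 (k1 : Int) 1).all (fun j =>
            PySem.List.pyGet? p1 j == PySem.List.pyGet? rot (PySem.Int.mod (i + j) (n : Int)))
      then acc + 1 else acc) acc) 0

-- ===== PORT B =====
def count_overlaps_alt (perm1 : String) (perm2 : String) : Int :=
  let p2 := perm2.toList
  let n := p2.length
  if n = 0 then 0 else
  let p1 := perm1.toList
  let k1 := PySem.Chars.count p1 ['1']
  let pattern := PySem.List.slice p1 none (some (k1 : Int))
  let text := (List.replicate (2 + k1 / n) p2).flatten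
  let c := (PySem.List.pyRange 0 (n : Int) 1).foldl (fun acc i =>
    if PySem.List.slice text (some i) (some (i + (k1 : Int))) == pattern then acc + 1 else acc)
    (0 : Int)
  (n : Int) * c

-- ===== PRECONDITION & SPEC =====
def Spec_count_overlaps (perm1 : String) (perm2 : String) (out : Int) : Prop := out = count_overlaps_alt perm1 perm2
instance (perm1 : String) (perm2 : String) (out : Int) : Decidable (Spec_count_overlaps perm1 perm2 out) := by unfold Spec_count_overlaps; infer_instance

-- ===== CLAIM (what is proved, stated in full; the proofs are below) =====
def Claim_equal_count_overlaps : Prop := ∀ (perm1 : String) (perm2 : String), Dom_count_overlaps perm1 perm2 → Spec_count_overlaps perm1 perm2 (count_overlaps perm1 perm2)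

-- ===== LEMMAS AND PROOFS =====

-- cyclic-match predicate: perm1[:k1] matches the cyclic text of p2 starting at s
def pvQ (p1 p2 : List Char) (k1 s : Nat) : Bool :=
  decide (∀ j, j < k1 → p2[(s + j) % p2.length]? = p1[j]?)

-- indexing the flattened replication of p2 is cyclic indexing of p2
theorem pvText_get (p2 : List Char) (reps m : Nat) (h : m < reps * p2.length) :
    (List.replicate reps p2).flatten[m]? = p2[m % p2.length]? := by
  induction reps generalizing m with
  | zero => omega
  | succ k ih =>
    rw [List.replicate_succ, List.flatten_cons]
    rw [Nat.succ_mul] at h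
    by_cases hm : m < p2.length
    · rw [List.getElem?_append_left hm, Nat.mod_eq_of_lt hm]
    · have hm' : p2.length ≤ m := Nat.le_of_not_lt hm
      rw [List.getElem?_append_right hm', ih (m - p2.length) (by omega)]
      congr 1
      exact (Nat.mod_eq_sub_mod hm').symm

-- indexing a rotation of p2 is cyclic indexing of p2
theorem pvRot_get (p2 : List Char) (r m : Nat) (hr : r ≤ p2.length) (hm : m < p2.length) :
    (List.drop r p2 ++ List.take r p2)[m]? = p2[(m + r) % p2.length]? := by
  rw [← List.rotate_eq_drop_append_take hr, List.getElem?_rotate hm]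

theorem pvShift_perm (n r : Nat) (hr : r ≤ n) :
    ((List.range n).map (fun i => (i + r) % n)).Perm (List.range n) := by
  rcases Nat.eq_zero_or_pos n with h0 | hn
  · subst h0; simp
  apply List.perm_of_nodup_nodup_toFinset_eq
  · refine (List.nodup_range).map_on ?_
    intro i hi j hj h
    have h' : Nat.ModEq n (i + r) (j + r) := h
    have h2 := Nat.ModEq.add_right_cancel' r h'
    have hi' : i < n := List.mem_range.mp hi
    have hj' : j < n := List.mem_range.mp hj
    unfold Nat.ModEq at h2
    rwa [Nat.mod_eq_of_lt hi', Nat.mod_eq_of_lt hj'] at h2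
  · exact List.nodup_range
  · ext x
    simp only [List.mem_toFinset, List.mem_map, List.mem_range]
    constructor
    · rintro ⟨i, _, rfl⟩; exact Nat.mod_lt _ hn
    · intro hx
      refine ⟨(x + (n - r)) % n, Nat.mod_lt _ hn, ?_⟩
      rw [Nat.mod_add_mod, show x + (n - r) + r = x + n by omega, Nat.add_mod_right,
        Nat.mod_eq_of_lt hx]

theorem pvCount_shift (n r : Nat) (hr : r ≤ n) (Q : Nat → Bool) :
    List.countP (fun i => Q ((i + r) % n)) (List.range n) = List.countP Q (List.range n) := by
  have h := (pvShift_perm n r hr).countP_eq Q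
  rwa [List.countP_map] at h

-- A's inner all-check over a rotation, read as a cyclic match of p2
theorem pvA_inner (p1 p2 : List Char) (k1 r i : Nat) (hn : 0 < p2.length)
    (hr : r ≤ p2.length) (_hi : i < p2.length) :
    ((List.range k1).all (fun j : Nat =>
        PySem.List.pyGet? p1 (j : Int) ==
          PySem.List.pyGet? (List.drop r p2 ++ List.take r p2)
            (PySem.Int.mod (((i + j : Nat) : Int)) (p2.length : Int))))
      = pvQ p1 p2 k1 ((i + r) % p2.length) := by
  rw [Bool.eq_iff_iff]
  simp only [List.all_eq_true, List.mem_range, beq_iff_eq, pvQ,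
    decide_eq_true_eq, PySem.List.pyGet?_natCast]
  have hstep : ∀ j : Nat,
      PySem.List.pyGet? (List.drop r p2 ++ List.take r p2)
          (PySem.Int.mod (((i + j : Nat) : Int)) (p2.length : Int))
        = p2[((i + r) % p2.length + j) % p2.length]? := by
    intro j
    rw [PySem.Int.mod_natCast, PySem.List.pyGet?_natCast,
      pvRot_get p2 r _ hr (Nat.mod_lt _ hn)]
    congr 1
    rw [Nat.mod_add_mod, Nat.mod_add_mod, Nat.add_right_comm]
  constructor
  · intro h j hj
    rw [← hstep j, ← h j hj]
  · intro h j hj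
    rw [hstep j, h j hj]

-- B's slice comparison, read as the same cyclic match of p2
theorem pvB_cond (p1 p2 : List Char) (k1 i : Nat) (hn : 0 < p2.length) (_hi : i < p2.length) :
    (PySem.List.slice ((List.replicate (2 + k1 / p2.length) p2).flatten)
        (some (i : Int)) (some ((i : Int) + (k1 : Int)))
      == PySem.List.slice p1 none (some (k1 : Int))) = pvQ p1 p2 k1 i := by
  have hb : ∀ j, j < k1 → i + j < (2 + k1 / p2.length) * p2.length := by
    intro j hj
    have h1 := Nat.div_add_mod k1 p2.length
    have h2 := Nat.mod_lt k1 hn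
    nlinarith
  rw [PySem.List.slice_natCast_add, PySem.List.slice_to_natCast, Bool.eq_iff_iff, beq_iff_eq]
  unfold pvQ
  simp only [decide_eq_true_eq]
  constructor
  · intro h j hj
    have h' := congrArg (fun l => l[j]?) h
    simp only [List.getElem?_take, List.getElem?_drop, hj, if_pos] at h'
    rw [← pvText_get p2 _ _ (hb j hj)]
    exact h'
  · intro h
    apply List.ext_getElem?
    intro j
    simp only [List.getElem?_take, List.getElem?_drop]
    by_cases hj : j < k1
    · simp only [hj, if_pos]
      rw [pvText_get p2 _ _ (hb j hj)]
      exact h j hj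
    · simp [hj]

-- a fold that adds the same constant at every element of the list
theorem pvFoldl_const {α : Type} (l : List α) (f : Int → α → Int) (c : Int)
    (h : ∀ acc, ∀ x ∈ l, f acc x = acc + c) (a : Int) :
    List.foldl f a l = a + l.length * c := by
  induction l generalizing a with
  | nil => simp
  | cons x xs ih =>
    rw [List.foldl_cons, h a x List.mem_cons_self,
      ih (fun acc y hy => h acc y (List.mem_cons_of_mem x hy)) (a + c)]
    rw [List.length_cons]
    push_cast
    ring

-- ===== VERDICT (by name: the statement is the Claim_ definition above) =====
theorem count_overlaps_spec : Claim_equal_count_overlaps := by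
  intro perm1 perm2 _
  unfold Spec_count_overlaps
  simp only [count_overlaps, count_overlaps_alt, pvRotate]
  by_cases h0 : perm2.toList.length = 0
  · simp [h0, PySem.List.pyRange_zero_natCast]
  · have hn : 0 < perm2.toList.length := Nat.pos_of_ne_zero h0
    rw [if_neg h0]
    simp only [PySem.List.pyRange_zero_natCast, List.map_map, List.foldl_map, List.all_map,
      Function.comp_def]
    refine Eq.trans (pvFoldl_const _ _
      ((List.countP (pvQ perm1.toList perm2.toList (PySem.Chars.count perm1.toList ['1']))
        (List.range perm2.toList.length) : Nat) : Int) ?_ 0) ?_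
    · intro acc r hr
      have hr' : r ≤ perm2.toList.length := Nat.le_of_lt (List.mem_range.mp hr)
      rw [PySem.List.slice_from_natCast, PySem.List.slice_to_natCast]
      rw [PySem.List.foldl_if_add_one]
      congr 1
      rw [← pvCount_shift perm2.toList.length r hr'
        (pvQ perm1.toList perm2.toList (PySem.Chars.count perm1.toList ['1']))]
      norm_cast
      apply List.countP_congr
      intro i hi
      rw [pvA_inner perm1.toList perm2.toList _ r i hn hr' (List.mem_range.mp hi)]
    · rw [List.length_range, PySem.List.foldl_if_add_one]
      simp only [zero_add]
      congr 1
      have hcnt : List.countP (fun i : Nat =>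
          PySem.List.slice
            ((List.replicate (2 + PySem.Chars.count perm1.toList ['1'] / perm2.toList.length)
              perm2.toList).flatten)
            (some (i : Int)) (some ((i : Int) + (PySem.Chars.count perm1.toList ['1'] : Int)))
          == PySem.List.slice perm1.toList none
              (some (PySem.Chars.count perm1.toList ['1'] : Int)))
          (List.range perm2.toList.length)
          = List.countP (pvQ perm1.toList perm2.toList (PySem.Chars.count perm1.toList ['1']))
              (List.range perm2.toList.length) := by
        apply List.countP_congr
        intro i hi
        rw [pvB_cond perm1.toList perm2.toList _ i hn (List.mem_range.mp hi)]
      exact_mod_cast hcnt.symm
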